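-- pv_equiv track=rewrite | github.com/SumoLogic/sumologic-documentation | scripts/validate_queries.py | validate_query_syntax
-- ===== SOURCE A (Python) =====
-- def validate_query_syntax(query):
--     """Basic syntax validation for SumoLogic queries"""
--     errors = []
--
--     # Check for basic syntax issues
--     if '|' in query:
--         # Split by pipes to check operators
--         parts = [part.strip() for part in query.split('|')]
--         for i, part in enumerate(parts):
--             if not part:
--                 errors.append(f"Empty pipe section at position {i}")
--
--             # Check for common operator patterns
--             if i > 0:  # Skip the first part (search expression)
--                 if not any(op in part.lower() for op in [
--                     'where', 'parse', 'json', 'count', 'sum', 'avg', 'max', 'min',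
--                     'timeslice', 'sort', 'top', 'bottom', 'fields', 'if', 'lookup',
--                     'join', 'extract', 'formatDate', 'toLowerCase', 'toUpperCase'
--                 ]):
--                     # This might be a custom function or valid operator we don't know about
--                     pass
--
--     # Check for unmatched quotes
--     single_quotes = query.count("'") - query.count("\\'")
--     double_quotes = query.count('"') - query.count('\\"')
--
--     if single_quotes % 2 != 0:
--         errors.append("Unmatched single quotes")
--     if double_quotes % 2 != 0:
--         errors.append("Unmatched double quotes")
--
--     # Check for unmatched parentheses
--     paren_count = query.count('(') - query.count(')')
--     if paren_count != 0:
--         errors.append("Unmatched parentheses")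
--
--     # Check for unmatched brackets
--     bracket_count = query.count('[') - query.count(']')
--     if bracket_count != 0:
--         errors.append("Unmatched square brackets")
--
--     return errors
-- ===== SOURCE B (Python) =====
-- def validate_query_syntax(query):
--     """Basic syntax validation for SumoLogic queries (single-pass re-implementation)"""
--     pipe_errors = []
--     pipe_seen = False
--     seg_index = 0
--     seg_nonblank = False
--     sq = esc_sq = dq = esc_dq = paren = bracket = 0
--     prev = None
--     for ch in query:
--         if ch == '|':
--             pipe_seen = True
--             if not seg_nonblank:
--                 pipe_errors.append(f"Empty pipe section at position {seg_index}")
--             seg_index += 1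
--             seg_nonblank = False
--         elif ch == "'":
--             seg_nonblank = True
--             sq += 1
--             if prev == '\\':
--                 esc_sq += 1
--         elif ch == '"':
--             seg_nonblank = True
--             dq += 1
--             if prev == '\\':
--                 esc_dq += 1
--         elif ch == '(':
--             seg_nonblank = True
--             paren += 1
--         elif ch == ')':
--             seg_nonblank = True
--             paren -= 1
--         elif ch == '[':
--             seg_nonblank = True
--             bracket += 1
--         elif ch == ']':
--             seg_nonblank = True
--             bracket -= 1
--         elif not ch.isspace():
--             seg_nonblank = True
--         prev = ch
--     errors = []
--     if pipe_seen:
--         errors.extend(pipe_errors)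
--         if not seg_nonblank:
--             errors.append(f"Empty pipe section at position {seg_index}")
--     if (sq - esc_sq) % 2 != 0:
--         errors.append("Unmatched single quotes")
--     if (dq - esc_dq) % 2 != 0:
--         errors.append("Unmatched double quotes")
--     if paren != 0:
--         errors.append("Unmatched parentheses")
--     if bracket != 0:
--         errors.append("Unmatched square brackets")
--     return errors
-- ===== Notes on version B (the rewrite author's own statement) =====
-- stated objective: alternative
-- what changed: Replaces A's seven independent str.count() scans plus split/strip/enumerate pipe pass with a single loop over the characters that accumulates quote/escaped-quote/paren/bracket tallies and detects blank pipe sections incrementally (tracking the previous character for escapes), dropping the dead operator-pattern loop; errors are emitted in the same order.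
import Mathlib
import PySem

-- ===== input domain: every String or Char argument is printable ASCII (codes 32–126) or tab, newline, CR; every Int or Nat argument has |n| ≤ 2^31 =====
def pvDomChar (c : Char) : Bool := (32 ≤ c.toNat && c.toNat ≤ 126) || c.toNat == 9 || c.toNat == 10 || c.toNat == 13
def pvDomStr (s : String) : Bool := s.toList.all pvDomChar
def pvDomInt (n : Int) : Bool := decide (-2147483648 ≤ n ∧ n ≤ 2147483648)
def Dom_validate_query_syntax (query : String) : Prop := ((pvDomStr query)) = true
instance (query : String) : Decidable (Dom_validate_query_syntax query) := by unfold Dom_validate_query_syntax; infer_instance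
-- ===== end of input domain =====

-- B replaces A's several independent .count()/split scans with one single pass over the
-- characters accumulating all tallies (objective: alternative; same observable behaviour).


-- shared message formatting: f"Empty pipe section at position {i}"
def pvMsg (i : Int) : String := "Empty pipe section at position " ++ PySem.Int.toStr i

-- ===== PORT A =====
-- the list of operator names A scans for (the result of that scan is discarded: 'pass')
def pvOps : List String :=
  ["where", "parse", "json", "count", "sum", "avg", "max", "min",
   "timeslice", "sort", "top", "bottom", "fields", "if", "lookup",
   "join", "extract", "formatDate", "toLowerCase", "toUpperCase"]

def validate_query_syntax (query : String) : List String :=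
  let errors : List String := []
  -- if '|' in query: split by pipes, strip, report empty sections
  let errors :=
    if PySem.Str.isIn "|" query then
      let parts := ((PySem.Str.split? query "|").getD []).map PySem.Str.strip  -- sep "|" ≠ "": split? is always some here
      (PySem.List.enumerate parts 0).foldl
        (fun errs p =>
          let errs := if p.2 = "" then errs ++ [pvMsg p.1] else errs
          -- operator-pattern check: computed, then 'pass' in both branches
          if 0 < p.1 then
            (if ¬ (pvOps.any (fun op => PySem.Str.isIn op (PySem.Str.lower p.2))) then errs else errs)
          else errs)
        errors
    else errors
  let single_quotes : Int := (PySem.Str.count query "'" : Int) - (PySem.Str.count query "\\'" : Int)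
  let double_quotes : Int := (PySem.Str.count query "\"" : Int) - (PySem.Str.count query "\\\"" : Int)
  let errors := if PySem.Int.mod single_quotes 2 ≠ 0 then errors ++ ["Unmatched single quotes"] else errors
  let errors := if PySem.Int.mod double_quotes 2 ≠ 0 then errors ++ ["Unmatched double quotes"] else errors
  let paren_count : Int := (PySem.Str.count query "(" : Int) - (PySem.Str.count query ")" : Int)
  let errors := if paren_count ≠ 0 then errors ++ ["Unmatched parentheses"] else errors
  let bracket_count : Int := (PySem.Str.count query "[" : Int) - (PySem.Str.count query "]" : Int)
  let errors := if bracket_count ≠ 0 then errors ++ ["Unmatched square brackets"] else errors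
  errors

-- ===== PORT B =====
-- single pass: one structural recursion over the characters carrying all the loop state of Source B
def pvGoB : List Char → Option Char → Bool → Int → Bool → List String → Int → Int → Int → Int → Int → Int → List String
  | [], _, pipeSeen, segIdx, segNonblank, pipeErrs, sq, escSq, dq, escDq, paren, bracket =>
      (if pipeSeen then
         (if segNonblank then pipeErrs else pipeErrs ++ [pvMsg segIdx])
       else [])
      ++ (if PySem.Int.mod (sq - escSq) 2 ≠ 0 then ["Unmatched single quotes"] else [])
      ++ (if PySem.Int.mod (dq - escDq) 2 ≠ 0 then ["Unmatched double quotes"] else [])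
      ++ (if paren ≠ 0 then ["Unmatched parentheses"] else [])
      ++ (if bracket ≠ 0 then ["Unmatched square brackets"] else [])
  | c :: t, prev, pipeSeen, segIdx, segNonblank, pipeErrs, sq, escSq, dq, escDq, paren, bracket =>
      if c = '|' then
        pvGoB t (some c) true (segIdx + 1) false
          (if segNonblank then pipeErrs else pipeErrs ++ [pvMsg segIdx]) sq escSq dq escDq paren bracket
      else if c = '\'' then
        pvGoB t (some c) pipeSeen segIdx true pipeErrs (sq + 1)
          (if prev = some '\\' then escSq + 1 else escSq) dq escDq paren bracket
      else if c = '"' then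
        pvGoB t (some c) pipeSeen segIdx true pipeErrs sq escSq (dq + 1)
          (if prev = some '\\' then escDq + 1 else escDq) paren bracket
      else if c = '(' then
        pvGoB t (some c) pipeSeen segIdx true pipeErrs sq escSq dq escDq (paren + 1) bracket
      else if c = ')' then
        pvGoB t (some c) pipeSeen segIdx true pipeErrs sq escSq dq escDq (paren - 1) bracket
      else if c = '[' then
        pvGoB t (some c) pipeSeen segIdx true pipeErrs sq escSq dq escDq paren (bracket + 1)
      else if c = ']' then
        pvGoB t (some c) pipeSeen segIdx true pipeErrs sq escSq dq escDq paren (bracket - 1)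
      else if PySem.Chars.isspace c then
        pvGoB t (some c) pipeSeen segIdx segNonblank pipeErrs sq escSq dq escDq paren bracket
      else
        pvGoB t (some c) pipeSeen segIdx true pipeErrs sq escSq dq escDq paren bracket

def validate_query_syntax_alt (query : String) : List String :=
  pvGoB query.toList none false 0 false [] 0 0 0 0 0 0

-- ===== PRECONDITION & SPEC =====
def Spec_validate_query_syntax (query : String) (out : List String) : Prop := out = validate_query_syntax_alt query
instance (query : String) (out : List String) : Decidable (Spec_validate_query_syntax query out) := by unfold Spec_validate_query_syntax; infer_instance

-- ===== CLAIM (what is proved, stated in full; the proofs are below) =====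
def Claim_equal_validate_query_syntax : Prop := ∀ (query : String), Dom_validate_query_syntax query → Spec_validate_query_syntax query (validate_query_syntax query)

-- ===== LEMMAS AND PROOFS =====

def pvNs (c : Char) : Bool := !PySem.Chars.isspace c

def pvSplit1 : List Char → List (List Char)
  | [] => [[]]
  | c :: t =>
    if c = '|' then [] :: pvSplit1 t
    else
      match pvSplit1 t with
      | [] => [[c]]
      | h :: tl => (c :: h) :: tl

def pvHg : List (List Char) → Int → Bool → List String
  | [], _, _ => []
  | p :: rest, i, nb => (if nb || p.any pvNs then [] else [pvMsg i]) ++ pvHg rest (i + 1) false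

def pvG : List Char → Int → Bool → List String
  | [], i, nb => if nb then [] else [pvMsg i]
  | c :: t, i, nb =>
    if c = '|' then (if nb then [] else [pvMsg i]) ++ pvG t (i + 1) false
    else pvG t i (nb || pvNs c)

def pvF : List Char → Bool → Int → Bool → List String → List String
  | [], pS, i, nb, pe => if pS then (if nb then pe else pe ++ [pvMsg i]) else []
  | c :: t, pS, i, nb, pe =>
    if c = '|' then pvF t true (i + 1) false (if nb then pe else pe ++ [pvMsg i])
    else pvF t pS i (nb || pvNs c) pe

def pvPairs2 (a b : Char) : List Char → Nat
  | x :: y :: t => (if x = a ∧ y = b then 1 else 0) + pvPairs2 a b (y :: t)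
  | _ => 0

def pvPairsP (qc : Char) : Option Char → List Char → Int
  | _, [] => 0
  | prev, c :: t => (if c = qc ∧ prev = some '\\' then 1 else 0) + pvPairsP qc (some c) t

theorem pvCountGo1 (c : Char) : ∀ (fuel : Nat) (l : List Char) (acc : Nat),
    l.length ≤ fuel → PySem.Chars.count.go [c] fuel l acc = acc + l.count c := by
  intro fuel
  induction fuel with
  | zero =>
    intro l acc h
    have : l = [] := by cases l <;> simp_all
    subst this; simp [PySem.Chars.count.go]
  | succ f ih =>
    intro l acc h
    cases l with
    | nil => simp [PySem.Chars.count.go]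
    | cons x t =>
      rw [PySem.Chars.count.go]
      simp only [List.isPrefixOf, Bool.and_true]
      by_cases hx : c = x
      · subst hx
        simp only [beq_self_eq_true, if_pos trivial, List.length_cons, List.length_nil,
          List.drop_succ_cons, List.drop_zero]
        rw [ih t (acc + 1) (by simpa using h)]
        simp
        omega
      · have hx' : (c == x) = false := by simpa using hx
        simp only [hx', Bool.false_eq_true, if_false]
        rw [ih t acc (by simpa using h)]
        have : ¬ x = c := fun h' => hx h'.symm
        simp [this]

theorem pvCount1 (q : List Char) (c : Char) : PySem.Chars.count q [c] = q.count c := by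
  simp [PySem.Chars.count]
  simpa using pvCountGo1 c q.length q 0 le_rfl

theorem pvPairs2_cons_ne (a b : Char) (hab : a ≠ b) (t : List Char) :
    pvPairs2 a b (b :: t) = pvPairs2 a b t := by
  cases t with
  | nil => simp [pvPairs2]
  | cons z u =>
    have hz : ¬ (b = a ∧ z = b) := fun ⟨h1, _⟩ => hab h1.symm
    simp [pvPairs2, hz]

theorem pvCountGo2 (a b : Char) (hab : a ≠ b) : ∀ (fuel : Nat) (l : List Char) (acc : Nat),
    l.length ≤ fuel → PySem.Chars.count.go [a, b] fuel l acc = acc + pvPairs2 a b l := by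
  intro fuel
  induction fuel with
  | zero =>
    intro l acc h
    have : l = [] := by cases l <;> simp_all
    subst this; simp [PySem.Chars.count.go, pvPairs2]
  | succ f ih =>
    intro l acc h
    cases l with
    | nil => simp [PySem.Chars.count.go, pvPairs2]
    | cons x t =>
      rw [PySem.Chars.count.go]
      by_cases hp : List.isPrefixOf [a, b] (x :: t) = true
      · obtain ⟨y, u, rfl⟩ : ∃ y u, t = y :: u := by
          cases t with
          | nil => simp [List.isPrefixOf] at hp
          | cons y u => exact ⟨y, u, rfl⟩
        obtain ⟨hxa, hyb⟩ : a = x ∧ b = y := by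
          simpa [List.isPrefixOf] using hp
        subst hxa; subst hyb
        simp only [hp, if_pos trivial, List.length_cons, List.length_nil,
          List.drop_succ_cons, List.drop_zero]
        rw [ih u (acc + 1) (by simp at h ⊢; omega)]
        rw [show pvPairs2 a b (a :: b :: u) = 1 + pvPairs2 a b (b :: u) by simp [pvPairs2]]
        rw [pvPairs2_cons_ne a b hab u]
        omega
      · simp only [hp]
        rw [ih t acc (by simpa using h)]
        cases t with
        | nil => simp [pvPairs2]
        | cons y u =>
          have hxy : ¬ (x = a ∧ y = b) := by
            intro ⟨h1, h2⟩; subst h1; subst h2; simp [List.isPrefixOf] at hp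
          simp [pvPairs2, hxy]

theorem pvCount2 (q : List Char) (a b : Char) (hab : a ≠ b) :
    PySem.Chars.count q [a, b] = pvPairs2 a b q := by
  simp [PySem.Chars.count]
  simpa using pvCountGo2 a b hab q.length q 0 le_rfl

theorem pvSplit1_ne_nil (l : List Char) : pvSplit1 l ≠ [] := by
  cases l with
  | nil => simp [pvSplit1]
  | cons c t =>
    simp only [pvSplit1]
    split
    · simp
    · cases h : pvSplit1 t <;> simp

theorem pvSplitGo : ∀ (fuel : Nat) (l cur : List Char) (acc : List (List Char)),
    l.length ≤ fuel →
    PySem.Chars.splitOn.go ['|'] fuel l cur acc =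
      acc.reverse ++
        (match pvSplit1 l with
         | [] => [cur.reverse]
         | h :: tl => (cur.reverse ++ h) :: tl) := by
  intro fuel
  induction fuel with
  | zero =>
    intro l cur acc h
    have : l = [] := by cases l <;> simp_all
    subst this
    simp [PySem.Chars.splitOn.go, pvSplit1]
  | succ f ih =>
    intro l cur acc h
    cases l with
    | nil => simp [PySem.Chars.splitOn.go, pvSplit1]
    | cons c t =>
      rw [PySem.Chars.splitOn.go]
      by_cases hc : c = '|'
      · subst hc
        have hp : List.isPrefixOf ['|'] ('|' :: t) = true := by simp [List.isPrefixOf]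
        simp only [hp, if_pos trivial, List.length_cons, List.length_nil,
          List.drop_succ_cons, List.drop_zero]
        rw [ih t [] (cur.reverse :: acc) (by simpa using h)]
        cases hs : pvSplit1 t with
        | nil => exact absurd hs (pvSplit1_ne_nil t)
        | cons sh stl => simp [pvSplit1, hs]
      · have hp : List.isPrefixOf ['|'] (c :: t) = false := by
          simp [List.isPrefixOf]; exact fun h' => hc h'.symm
        simp only [hp, Bool.false_eq_true, if_false]
        rw [ih t (c :: cur) acc (by simpa using h)]
        cases hs : pvSplit1 t with
        | nil => exact absurd hs (pvSplit1_ne_nil t)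
        | cons sh stl => simp [pvSplit1, hs, hc]

theorem pvSplitOn (q : List Char) : PySem.Chars.splitOn q ['|'] = pvSplit1 q := by
  rw [PySem.Chars.splitOn]
  rw [pvSplitGo (q.length + 1) q [] [] (by omega)]
  cases hs : pvSplit1 q with
  | nil => exact absurd hs (pvSplit1_ne_nil q)
  | cons sh stl => simp

theorem pvPairsP_some (qc : Char) : ∀ (l : List Char) (x : Char),
    pvPairsP qc (some x) l = (pvPairs2 '\\' qc (x :: l) : Int) := by
  intro l
  induction l with
  | nil => intro x; simp [pvPairsP, pvPairs2]
  | cons y t ih =>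
    intro x
    rw [pvPairsP, ih y]
    rw [show pvPairs2 '\\' qc (x :: y :: t)
          = (if x = '\\' ∧ y = qc then 1 else 0) + pvPairs2 '\\' qc (y :: t) from rfl]
    have hiff : (y = qc ∧ some x = some '\\') ↔ (x = '\\' ∧ y = qc) := by
      constructor
      · rintro ⟨h1, h2⟩; exact ⟨Option.some_injective _ h2, h1⟩
      · rintro ⟨h1, h2⟩; exact ⟨h2, by rw [h1]⟩
    rw [if_congr hiff rfl rfl]
    push_cast
    ring

theorem pvPairsP_none (qc : Char) (l : List Char) :
    pvPairsP qc none l = (pvPairs2 '\\' qc l : Int) := by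
  cases l with
  | nil => simp [pvPairsP, pvPairs2]
  | cons c t =>
    rw [pvPairsP, pvPairsP_some qc t c]
    simp

theorem pvDropWhileNonspace : ∀ (p : List Char) (x : Char), x ∈ p →
    PySem.Chars.isspace x = false →
    ∃ y ∈ List.dropWhile PySem.Chars.isspace p, PySem.Chars.isspace y = false := by
  intro p
  induction p with
  | nil => intro x hx; simp at hx
  | cons a q ihp =>
    intro x hx hns
    by_cases ha : PySem.Chars.isspace a
    · rw [List.dropWhile_cons_of_pos ha]
      rcases List.mem_cons.mp hx with rfl | hxq
      · rw [ha] at hns; cases hns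
      · exact ihp x hxq hns
    · refine ⟨a, ?_, by simpa using ha⟩
      rw [List.dropWhile_cons_of_neg ha]
      exact List.mem_cons_self

theorem pvStripNil (p : List Char) :
    PySem.Chars.strip p = [] ↔ p.any pvNs = false := by
  rw [PySem.Chars.strip, PySem.Chars.lstrip, PySem.Chars.rstrip]
  constructor
  · intro h
    rw [List.reverse_eq_nil_iff, List.dropWhile_eq_nil_iff] at h
    by_contra ha
    rw [Bool.not_eq_false, List.any_eq_true] at ha
    obtain ⟨x, hx, hns⟩ := ha
    have hns' : PySem.Chars.isspace x = false := by
      simpa [pvNs] using hns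
    obtain ⟨y, hy, hyns⟩ := pvDropWhileNonspace p x hx hns'
    have := h y (by simpa using hy)
    rw [this] at hyns; cases hyns
  · intro h
    have hall : ∀ x ∈ p, PySem.Chars.isspace x = true := by
      intro x hx
      by_contra hc
      have : p.any pvNs = true := List.any_eq_true.mpr ⟨x, hx, by simp [pvNs, hc]⟩
      rw [this] at h; cases h
    have h1 : List.dropWhile PySem.Chars.isspace p = [] :=
      List.dropWhile_eq_nil_iff.mpr hall
    rw [h1]
    simp

theorem pvG_Hg : ∀ (cs : List Char) (i : Int) (nb : Bool),
    pvG cs i nb = pvHg (pvSplit1 cs) i nb := by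
  intro cs
  induction cs with
  | nil => intro i nb; simp [pvG, pvSplit1, pvHg]
  | cons c t ih =>
    intro i nb
    by_cases hc : c = '|'
    · subst hc
      rw [pvG, if_pos rfl]
      rw [show pvSplit1 ('|' :: t) = [] :: pvSplit1 t by simp [pvSplit1]]
      rw [pvHg]
      simp only [List.any_nil, Bool.or_false]
      rw [ih]
    · rw [pvG, if_neg hc, ih]
      cases hs : pvSplit1 t with
      | nil => exact absurd hs (pvSplit1_ne_nil t)
      | cons sh stl =>
        rw [show pvSplit1 (c :: t) = (c :: sh) :: stl by simp [pvSplit1, hs, hc]]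
        rw [pvHg, pvHg]
        simp [List.any_cons, Bool.or_assoc, pvNs]

theorem pvF_eq : ∀ (cs : List Char) (pS : Bool) (i : Int) (nb : Bool) (pe : List String),
    pvF cs pS i nb pe = if pS || cs.contains '|' then pe ++ pvG cs i nb else [] := by
  intro cs
  induction cs with
  | nil =>
    intro pS i nb pe
    rw [pvF, pvG]
    cases pS <;> cases nb <;> simp
  | cons c t ih =>
    intro pS i nb pe
    by_cases hc : c = '|'
    · subst hc
      rw [pvF, if_pos rfl, ih, pvG, if_pos rfl]
      simp only [List.contains_cons, beq_self_eq_true, Bool.true_or, Bool.or_true, if_pos trivial]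
      cases nb <;> simp
    · rw [pvF, if_neg hc, ih, pvG, if_neg hc]
      have hne : ¬ ('|' = c) := fun h => hc h.symm
      simp [hne]

-- final values of B's counters, mirroring pvGoB's updates step for step
def pvQc (qc : Char) : List Char → Int → Int
  | [], a => a
  | c :: t, a => pvQc qc t (if c = qc then a + 1 else a)

def pvEsc (qc : Char) : List Char → Option Char → Int → Int
  | [], _, a => a
  | c :: t, prev, a => pvEsc qc t (some c) (if c = qc ∧ prev = some '\\' then a + 1 else a)

def pvBal (o cl : Char) : List Char → Int → Int
  | [], a => a
  | c :: t, a => pvBal o cl t (if c = o then a + 1 else if c = cl then a - 1 else a)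

theorem pvQc_out (qc : Char) : ∀ (cs : List Char) (a : Int),
    pvQc qc cs a = a + (cs.count qc : Int) := by
  intro cs
  induction cs with
  | nil => intro a; simp [pvQc]
  | cons c t ih =>
    intro a
    rw [pvQc, ih]
    by_cases hc : c = qc
    · subst hc; simp; omega
    · have : ¬ (c = qc) := hc
      simp [this]

theorem pvEsc_out (qc : Char) : ∀ (cs : List Char) (prev : Option Char) (a : Int),
    pvEsc qc cs prev a = a + pvPairsP qc prev cs := by
  intro cs
  induction cs with
  | nil => intro prev a; simp [pvEsc, pvPairsP]
  | cons c t ih =>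
    intro prev a
    rw [pvEsc, ih, pvPairsP]
    split_ifs <;> omega

theorem pvBal_out (o cl : Char) (hocl : o ≠ cl) : ∀ (cs : List Char) (a : Int),
    pvBal o cl cs a = a + (cs.count o : Int) - (cs.count cl : Int) := by
  intro cs
  induction cs with
  | nil => intro a; simp [pvBal]
  | cons c t ih =>
    intro a
    rw [pvBal, ih]
    by_cases h1 : c = o
    · subst h1
      simp [fun h : c = cl => hocl h]
      omega
    · by_cases h2 : c = cl
      · subst h2
        simp [h1]
        omega
      · simp [h1, h2]

theorem pvIsspaceFalse : PySem.Chars.isspace '\'' = false ∧ PySem.Chars.isspace '"' = false ∧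
    PySem.Chars.isspace '(' = false ∧ PySem.Chars.isspace ')' = false ∧
    PySem.Chars.isspace '[' = false ∧ PySem.Chars.isspace ']' = false := by
  decide

theorem pvGoB_eq : ∀ (cs : List Char) (prev : Option Char) (pS : Bool) (i : Int) (nb : Bool)
    (pe : List String) (sq esq dq edq par br : Int),
    pvGoB cs prev pS i nb pe sq esq dq edq par br =
      pvF cs pS i nb pe
      ++ (if PySem.Int.mod (pvQc '\'' cs sq - pvEsc '\'' cs prev esq) 2 ≠ 0 then ["Unmatched single quotes"] else [])
      ++ (if PySem.Int.mod (pvQc '"' cs dq - pvEsc '"' cs prev edq) 2 ≠ 0 then ["Unmatched double quotes"] else [])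
      ++ (if pvBal '(' ')' cs par ≠ 0 then ["Unmatched parentheses"] else [])
      ++ (if pvBal '[' ']' cs br ≠ 0 then ["Unmatched square brackets"] else []) := by
  intro cs
  induction cs with
  | nil =>
    intro prev pS i nb pe sq esq dq edq par br
    simp only [pvGoB, pvF, pvQc, pvEsc, pvBal]
    rfl
  | cons c t ih =>
    intro prev pS i nb pe sq esq dq edq par br
    rw [pvGoB]
    by_cases h1 : c = '|'
    · subst h1
      rw [if_pos rfl, ih]
      simp [pvF, pvQc, pvEsc, pvBal]
    · rw [if_neg h1]
      by_cases h2 : c = '\''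
      · subst h2
        rw [if_pos rfl, ih]
        simp [pvF, pvQc, pvEsc, pvBal, pvNs, pvIsspaceFalse, h1]
      · rw [if_neg h2]
        by_cases h3 : c = '"'
        · subst h3
          rw [if_pos rfl, ih]
          simp [pvF, pvQc, pvEsc, pvBal, pvNs, pvIsspaceFalse, h1, h2]
        · rw [if_neg h3]
          by_cases h4 : c = '('
          · subst h4
            rw [if_pos rfl, ih]
            simp [pvF, pvQc, pvEsc, pvBal, pvNs, pvIsspaceFalse, h1, h2, h3]
          · rw [if_neg h4]
            by_cases h5 : c = ')'
            · subst h5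
              rw [if_pos rfl, ih]
              simp [pvF, pvQc, pvEsc, pvBal, pvNs, pvIsspaceFalse, h1, h2, h3, h4]
            · rw [if_neg h5]
              by_cases h6 : c = '['
              · subst h6
                rw [if_pos rfl, ih]
                simp [pvF, pvQc, pvEsc, pvBal, pvNs, pvIsspaceFalse, h1, h2, h3, h4, h5]
              · rw [if_neg h6]
                by_cases h7 : c = ']'
                · subst h7
                  rw [if_pos rfl, ih]
                  simp [pvF, pvQc, pvEsc, pvBal, pvNs, pvIsspaceFalse, h1, h2, h3, h4, h5, h6]
                · rw [if_neg h7]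
                  by_cases h8 : PySem.Chars.isspace c = true
                  · rw [if_pos h8, ih]
                    simp [pvF, pvQc, pvEsc, pvBal, pvNs, h1, h2, h3, h4, h5, h6, h7, h8]
                  · rw [if_neg h8, ih]
                    have h8' : PySem.Chars.isspace c = false := by
                      simpa using h8
                    simp [pvF, pvQc, pvEsc, pvBal, pvNs, h1, h2, h3, h4, h5, h6, h7, h8']

theorem pvIsInSingle (l : List Char) (c : Char) : PySem.Chars.isIn [c] l = l.contains c := by
  by_cases h : c ∈ l
  · obtain ⟨s, t, rfl⟩ := List.append_of_mem h
    have hin : [c] <:+: s ++ c :: t := ⟨s, t, by simp⟩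
    rw [(PySem.Chars.isIn_iff_infix _ _).mpr hin]
    simp [h]
  · have hni : ¬ ([c] <:+: l) := fun hin => h (hin.subset (by simp))
    rw [(PySem.Chars.isIn_eq_false_iff _ _).mpr hni]
    simp [h]

theorem pvAfold : ∀ (parts : List (List Char)) (i : Int) (errs : List String),
    (PySem.List.enumerate (parts.map (fun cs => String.ofList (PySem.Chars.strip cs))) i).foldl
      (fun errs p => if p.2 = "" then errs ++ [pvMsg p.1] else errs) errs
    = errs ++ pvHg parts i false := by
  intro parts
  induction parts with
  | nil => intro i errs; simp [pvHg]
  | cons p rest ih =>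
    intro i errs
    simp only [List.map_cons, PySem.List.enumerate_cons, List.foldl_cons]
    rw [ih, pvHg]
    by_cases hp : (p.any pvNs) = false
    · have he : String.ofList (PySem.Chars.strip p) = "" := by
        rw [String.ofList_eq_empty_iff]
        exact (pvStripNil p).mpr hp
      simp [he, hp]
    · have h1 : PySem.Chars.strip p ≠ [] := fun h => hp ((pvStripNil p).mp h)
      have he : ¬ (String.ofList (PySem.Chars.strip p) = "") := by
        rw [String.ofList_eq_empty_iff]; exact h1
      have hp' : p.any pvNs = true := by simpa using hp
      simp [he, hp']

theorem pvIteApp (c : Prop) [Decidable c] (a : List String) (m : String) :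
    (if c then a ++ [m] else a) = a ++ (if c then [m] else []) := by
  split <;> simp

-- ===== VERDICT (by name: the statement is the Claim_ definition above) =====
theorem validate_query_syntax_spec : Claim_equal_validate_query_syntax := by
  intro query _
  unfold Spec_validate_query_syntax
  simp only [validate_query_syntax, validate_query_syntax_alt]
  rw [pvGoB_eq, pvF_eq]
  rw [pvQc_out, pvQc_out, pvEsc_out, pvEsc_out, pvPairsP_none, pvPairsP_none,
      pvBal_out '(' ')' (by decide), pvBal_out '[' ']' (by decide)]
  simp only [ite_self]
  rw [PySem.Str.isIn, show ("|" : String).toList = ['|'] by decide, pvIsInSingle]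
  simp only [PySem.Str.split?, PySem.Chars.split?, show ("|" : String).toList = ['|'] by decide]
  simp only [List.isEmpty_cons, Bool.false_eq_true, if_false, Option.map_some, Option.getD_some]
  rw [pvSplitOn]
  simp only [List.map_map, Function.comp_def, PySem.Str.strip, String.toList_ofList]
  rw [pvAfold, ← pvG_Hg]
  simp only [PySem.Str.count,
    show ("'" : String).toList = ['\''] by decide,
    show ("\\'" : String).toList = ['\\', '\''] by decide,
    show ("\"" : String).toList = ['"'] by decide,
    show ("\\\"" : String).toList = ['\\', '"'] by decide,
    show ("(" : String).toList = ['('] by decide,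
    show (")" : String).toList = [')'] by decide,
    show ("[" : String).toList = ['['] by decide,
    show ("]" : String).toList = [']'] by decide]
  rw [pvCount1, pvCount1, pvCount1, pvCount1, pvCount1, pvCount1,
      pvCount2 _ _ _ (by decide), pvCount2 _ _ _ (by decide)]
  simp only [Bool.false_or, List.nil_append, zero_add]
  simp [pvIteApp, List.append_assoc]
  split_ifs <;> simp [List.append_assoc]
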